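-- pv_equiv track=rewrite | github.com/SatyamSidana/leetcode | 624-maximum-distance-in-arrays/maximum-distance-in-arrays.py | maxDistance
-- ===== SOURCE A (Python) =====
-- from typing import List
--
-- def maxDistance(arr: List[List[int]]) -> int:
--     a=[]
--     b=[]
--     for i in range(len(arr)):
--         a.append([arr[i][0],i])
--         b.append([arr[i][-1],i])
--     a.sort()
--     b.sort()
--     if a[0][1]==b[-1][1]:
--         return max(abs(a[0][0]-b[-2][0]),abs(a[1][0]-b[-1][0]))
--     return abs(a[0][0]-b[-1][0])
-- ===== SOURCE B (Python) =====
-- def maxDistance(arr):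
--     # One pass: keep the two lexicographically smallest (first_elem, index)
--     # pairs and the two lexicographically largest (last_elem, index) pairs.
--     m1 = m2 = None
--     M1 = M2 = None
--     for i, row in enumerate(arr):
--         p = (row[0], i)
--         if m1 is None or p < m1:
--             m1, m2 = p, m1
--         elif m2 is None or p < m2:
--             m2 = p
--         q = (row[-1], i)
--         if M1 is None or q > M1:
--             M1, M2 = q, M1
--         elif M2 is None or q > M2:
--             M2 = q
--     if m1[1] == M1[1]:
--         return max(abs(m1[0] - M2[0]), abs(m2[0] - M1[0]))
--     return abs(m1[0] - M1[0])
-- ===== Notes on version B (the rewrite author's own statement) =====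
-- stated objective: alternative
-- what changed: Replaced building and fully sorting two index-tagged lists with a single pass that tracks only the two lexicographically smallest (first,index) pairs and the two largest (last,index) pairs.
import Mathlib
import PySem

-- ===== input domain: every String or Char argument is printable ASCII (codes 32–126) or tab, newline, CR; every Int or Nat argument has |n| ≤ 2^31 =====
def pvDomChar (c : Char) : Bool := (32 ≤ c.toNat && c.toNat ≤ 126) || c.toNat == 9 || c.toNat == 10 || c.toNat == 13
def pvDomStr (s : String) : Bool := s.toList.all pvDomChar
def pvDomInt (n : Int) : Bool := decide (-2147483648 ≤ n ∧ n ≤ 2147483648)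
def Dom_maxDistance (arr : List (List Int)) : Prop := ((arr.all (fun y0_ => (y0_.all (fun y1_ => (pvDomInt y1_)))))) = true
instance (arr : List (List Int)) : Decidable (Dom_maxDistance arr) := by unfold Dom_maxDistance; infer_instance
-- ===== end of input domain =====

-- B replaces A's build-two-lists-and-sort with a single pass that keeps only the two
-- lexicographically smallest (first,index) pairs and the two largest (last,index) pairs.

-- ===== PORT A =====
def maxDistance (arr : List (List Int)) : Int :=
  let ab := (PySem.List.pyRange 0 (PySem.List.len arr)).foldl
    (fun (s : List (Int × Int) × List (Int × Int)) i =>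
      (s.1 ++ [(PySem.List.pyGetD (PySem.List.pyGetD arr i []) 0 0, i)],
       s.2 ++ [(PySem.List.pyGetD (PySem.List.pyGetD arr i []) (-1) 0, i)]))
    ([], [])
  let a := PySem.List.sorted2 ab.1 Prod.fst Prod.snd
  let b := PySem.List.sorted2 ab.2 Prod.fst Prod.snd
  if (PySem.List.pyGetD a 0 ((0 : Int), (0 : Int))).2 = (PySem.List.pyGetD b (-1) ((0 : Int), (0 : Int))).2 then
    max |(PySem.List.pyGetD a 0 ((0 : Int), (0 : Int))).1 - (PySem.List.pyGetD b (-2) ((0 : Int), (0 : Int))).1|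
        |(PySem.List.pyGetD a 1 ((0 : Int), (0 : Int))).1 - (PySem.List.pyGetD b (-1) ((0 : Int), (0 : Int))).1|
  else
    |(PySem.List.pyGetD a 0 ((0 : Int), (0 : Int))).1 - (PySem.List.pyGetD b (-1) ((0 : Int), (0 : Int))).1|

-- ===== PORT B =====
-- Python tuple comparison p < q on (Int, Int)
def tupLt (p q : Int × Int) : Bool := p.1 < q.1 || (p.1 == q.1 && p.2 < q.2)

-- 'if m1 is None or p < m1: m1, m2 = p, m1 elif m2 is None or p < m2: m2 = p'
def updMin (m : Option (Int × Int) × Option (Int × Int)) (p : Int × Int) :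
    Option (Int × Int) × Option (Int × Int) :=
  match m with
  | (none, _) => (some p, none)
  | (some v, m2) =>
    if tupLt p v then (some p, some v)
    else match m2 with
      | none => (some v, some p)
      | some w => if tupLt p w then (some v, some p) else (some v, some w)

-- 'if M1 is None or q > M1: M1, M2 = q, M1 elif M2 is None or q > M2: M2 = q'
def updMax (M : Option (Int × Int) × Option (Int × Int)) (q : Int × Int) :
    Option (Int × Int) × Option (Int × Int) :=
  match M with
  | (none, _) => (some q, none)
  | (some v, M2) =>
    if tupLt v q then (some q, some v)
    else match M2 with
      | none => (some v, some q)
      | some w => if tupLt w q then (some v, some q) else (some v, some w)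

def bStep
    (s : Option (Int × Int) × Option (Int × Int) × Option (Int × Int) × Option (Int × Int))
    (ir : Int × List Int) :
    Option (Int × Int) × Option (Int × Int) × Option (Int × Int) × Option (Int × Int) :=
  let p := (PySem.List.pyGetD ir.2 0 0, ir.1)
  let q := (PySem.List.pyGetD ir.2 (-1) 0, ir.1)
  let mm := updMin (s.1, s.2.1) p
  let MM := updMax (s.2.2.1, s.2.2.2) q
  (mm.1, mm.2, MM.1, MM.2)

def maxDistance_alt (arr : List (List Int)) : Int :=
  match (PySem.List.enumerate arr).foldl bStep (none, none, none, none) with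
  | (some m1, some m2, some M1, some M2) =>
    if m1.2 = M1.2 then max |m1.1 - M2.1| |m2.1 - M1.1| else |m1.1 - M1.1|
  | _ => 0  -- unreachable under Pre_ (Python raises there)

-- ===== PRECONDITION & SPEC =====
-- Pre_ excludes exactly the inputs where A raises IndexError: fewer than two rows, or an empty row.
def Pre_maxDistance (arr : List (List Int)) : Prop := 2 ≤ arr.length ∧ ∀ row ∈ arr, row ≠ []
instance (arr : List (List Int)) : Decidable (Pre_maxDistance arr) := by unfold Pre_maxDistance; infer_instance
def pvWitness_maxDistance : List (List Int) := [[1], [2, 3]]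
def Spec_maxDistance (arr : List (List Int)) (out : Int) : Prop := out = maxDistance_alt arr
instance (arr : List (List Int)) (out : Int) : Decidable (Spec_maxDistance arr out) := by unfold Spec_maxDistance; infer_instance

-- ===== CLAIM =====
def Claim_equal_maxDistance : Prop := ∀ (arr : List (List Int)), Dom_maxDistance arr → Pre_maxDistance arr → Spec_maxDistance arr (maxDistance arr)

-- ===== LEMMAS AND PROOFS =====

-- the 'before' predicate of sorted2 with keys fst, snd (Python's lexicographic list comparison)
def lexlt (a b : Int × Int) : Bool :=
  decide (a.1 < b.1) || (!decide (b.1 < a.1) && decide (a.2 < b.2))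

theorem tupLt_eq_lexlt (a b : Int × Int) : tupLt a b = lexlt a b := by
  unfold tupLt lexlt
  by_cases h1 : a.1 < b.1 <;> by_cases h2 : b.1 < a.1 <;> by_cases h3 : a.2 < b.2 <;>
    simp [h1, h2, h3] <;> omega

theorem lexlt_iff (a b : Int × Int) :
    lexlt a b = true ↔ (a.1 < b.1 ∨ (a.1 = b.1 ∧ a.2 < b.2)) := by
  unfold lexlt
  by_cases h1 : a.1 < b.1 <;> by_cases h2 : b.1 < a.1 <;> by_cases h3 : a.2 < b.2 <;>
    simp [h1, h2, h3] <;> omega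

theorem lexlt_false_iff (a b : Int × Int) :
    lexlt a b = false ↔ ¬ (a.1 < b.1 ∨ (a.1 = b.1 ∧ a.2 < b.2)) := by
  rw [← lexlt_iff]
  cases h : lexlt a b <;> simp

def first2 : List (Int × Int) → Option (Int × Int) × Option (Int × Int)
  | [] => (none, none)
  | [x] => (some x, none)
  | x :: y :: _ => (some x, some y)

def pen : List (Int × Int) → Option (Int × Int)
  | [] => none
  | [_] => none
  | [u, _] => some u
  | _ :: v :: w :: t => pen (v :: w :: t)

def last2 (l : List (Int × Int)) : Option (Int × Int) × Option (Int × Int) :=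
  (l.getLast?, pen l)

theorem insertBy_cons (before : Int × Int → Int × Int → Bool) (x y : Int × Int) (ys : List (Int × Int)) :
    PySem.List.insertBy before x (y :: ys) =
      if before x y then x :: y :: ys else y :: PySem.List.insertBy before x ys := by
  rfl

theorem first2_insertBy (p : Int × Int) (l : List (Int × Int)) :
    first2 (PySem.List.insertBy lexlt p l) = updMin (first2 l) p := by
  match l with
  | [] => rfl
  | [v] =>
    rw [insertBy_cons]
    by_cases h : lexlt p v = true <;>
      simp [h, PySem.List.insertBy, first2, updMin, tupLt_eq_lexlt]
  | v :: w :: t =>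
    rw [insertBy_cons]
    by_cases h : lexlt p v = true
    · simp [h, first2, updMin, tupLt_eq_lexlt]
    · rw [insertBy_cons]
      by_cases h2 : lexlt p w = true <;>
        simp [h, h2, first2, updMin, tupLt_eq_lexlt]

theorem lexlt_asymm {a b : Int × Int} (h : lexlt a b = true) : lexlt b a = false := by
  rw [lexlt_iff] at h; rw [lexlt_false_iff]; omega

theorem lexlt_total_ne {a b : Int × Int} (h : lexlt a b = false) (hne : a.2 ≠ b.2) :
    lexlt b a = true := by
  rw [lexlt_false_iff] at h; rw [lexlt_iff]; omega

theorem lex_below {q x v : Int × Int} (h : lexlt q x = true)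
    (hv : v = x ∨ lexlt v x = false) : lexlt v q = false := by
  rcases hv with rfl | hv
  · exact lexlt_asymm h
  · rw [lexlt_iff] at h; rw [lexlt_false_iff] at hv ⊢; omega

theorem pen_some (t : List (Int × Int)) : ∀ (u v : Int × Int),
    ∃ w, pen (u :: v :: t) = some w ∧ w ∈ u :: v :: t := by
  induction t with
  | nil => intro u v; exact ⟨u, rfl, by simp⟩
  | cons z t ih =>
    intro u v
    obtain ⟨w, hw, hm⟩ := ih v z
    refine ⟨w, by simpa [pen] using hw, ?_⟩
    simp at hm ⊢; tauto

theorem last2_cons (x u v : Int × Int) (t : List (Int × Int)) :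
    last2 (x :: u :: v :: t) = last2 (u :: v :: t) := by
  simp [last2, pen, List.getLast?_cons_cons]

theorem insertBy_length (before : Int × Int → Int × Int → Bool) (x : Int × Int)
    (l : List (Int × Int)) :
    (PySem.List.insertBy before x l).length = l.length + 1 := by
  simpa using (PySem.List.insertBy_perm before x l).length_eq

theorem last2_insertBy (q : Int × Int) (l : List (Int × Int))
    (hs : l.Pairwise (fun a b => lexlt b a = false))
    (hf : ∀ x ∈ l, x.2 ≠ q.2) :
    last2 (PySem.List.insertBy lexlt q l) = updMax (last2 l) q := by
  induction l with
  | nil => rfl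
  | cons x t ih =>
    match t with
    | [] =>
      rw [insertBy_cons]
      by_cases h : lexlt q x = true
      · have hx : lexlt x q = false := lexlt_asymm h
        simp [h, last2, pen, updMax, tupLt_eq_lexlt, hx]
      · have hx : lexlt x q = true := lexlt_total_ne (by simpa using h) (hf x (by simp)).symm
        simp [h, last2, pen, updMax, tupLt_eq_lexlt, hx, PySem.List.insertBy]
    | [y] =>
      have hyx : lexlt y x = false := (List.pairwise_cons.mp hs).1 y (by simp)
      rw [insertBy_cons]
      by_cases h : lexlt q x = true
      · have hxq : lexlt x q = false := lexlt_asymm h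
        have hyq : lexlt y q = false := lex_below h (Or.inr hyx)
        simp [h, last2, pen, updMax, tupLt_eq_lexlt, hxq, hyq]
      · rw [insertBy_cons]
        by_cases h2 : lexlt q y = true
        · have hyq : lexlt y q = false := lexlt_asymm h2
          have hxq : lexlt x q = true := lexlt_total_ne (by simpa using h) (hf x (by simp)).symm
          simp [h, h2, last2, pen, updMax, tupLt_eq_lexlt, hyq, hxq]
        · have hyq : lexlt y q = true := lexlt_total_ne (by simpa using h2) (hf y (by simp)).symm
          simp [h, h2, last2, pen, updMax, tupLt_eq_lexlt, hyq, PySem.List.insertBy]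
    | y :: z :: t2 =>
      have hhead : ∀ b ∈ y :: z :: t2, lexlt b x = false := (List.pairwise_cons.mp hs).1
      rw [insertBy_cons]
      by_cases h : lexlt q x = true
      · -- q is below everything: inserted at the front, last two unchanged
        simp only [h, if_true]
        rw [show (q :: x :: y :: z :: t2) = q :: x :: y :: (z :: t2) from rfl, last2_cons]
        obtain ⟨v, hv⟩ := Option.isSome_iff_exists.mp
          (List.getLast?_isSome.mpr (by simp : (x :: y :: z :: t2) ≠ []))
        obtain ⟨w, hw, hwm⟩ := pen_some (z :: t2) x y
        have hvm := List.mem_of_getLast? hv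
        have hvq : lexlt v q = false := by
          apply lex_below h
          rcases List.mem_cons.mp hvm with rfl | hvm'
          · exact Or.inl rfl
          · exact Or.inr (hhead v hvm')
        have hwq : lexlt w q = false := by
          apply lex_below h
          rcases List.mem_cons.mp hwm with rfl | hwm'
          · exact Or.inl rfl
          · exact Or.inr (hhead w hwm')
        have hlast : last2 (x :: y :: z :: t2) = (some v, some w) := by
          unfold last2; rw [hv, hw]
        rw [hlast]
        simp [updMax, tupLt_eq_lexlt, hvq, hwq]
      · simp only [h, if_false, Bool.false_eq_true]
        rw [show (x :: y :: z :: t2) = x :: y :: z :: t2 from rfl, last2_cons]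
        have hih := ih (List.pairwise_cons.mp hs).2
          (fun a ha => hf a (List.mem_cons_of_mem _ ha))
        rw [← hih]
        rcases hI : PySem.List.insertBy lexlt q (y :: z :: t2) with _ | ⟨u, _ | ⟨v, r⟩⟩
        · have hl := insertBy_length lexlt q (y :: z :: t2); rw [hI] at hl; simp at hl
        · have hl := insertBy_length lexlt q (y :: z :: t2); rw [hI] at hl; simp at hl
        · rw [last2_cons]

theorem insertBy_pairwise_lex (q : Int × Int) (l : List (Int × Int))
    (hs : l.Pairwise (fun a b => lexlt b a = false)) :
    (PySem.List.insertBy lexlt q l).Pairwise (fun a b => lexlt b a = false) := by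
  induction l with
  | nil => simp [PySem.List.insertBy]
  | cons x t ih =>
    rw [insertBy_cons]
    obtain ⟨hx, ht⟩ := List.pairwise_cons.mp hs
    by_cases h : lexlt q x = true
    · simp only [h, if_true]
      refine List.pairwise_cons.mpr ⟨?_, hs⟩
      intro b hb
      rcases List.mem_cons.mp hb with rfl | hb'
      · exact lexlt_asymm h
      · exact lex_below h (Or.inr (hx b hb'))
    · simp only [h, if_false, Bool.false_eq_true]
      refine List.pairwise_cons.mpr ⟨?_, ih ht⟩
      intro b hb
      rcases (PySem.List.insertBy_mem_iff _ _ _ _).mp hb with rfl | hb'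
      · simpa using h
      · exact hx b hb'

def gA (arr : List (List Int)) (i : Int) : Int × Int :=
  (PySem.List.pyGetD (PySem.List.pyGetD arr i []) 0 0, i)
def hA (arr : List (List Int)) (i : Int) : Int × Int :=
  (PySem.List.pyGetD (PySem.List.pyGetD arr i []) (-1) 0, i)

theorem buildAB (arr : List (List Int)) (L : List Int) :
    ∀ xs ys : List (Int × Int),
    L.foldl (fun (s : List (Int × Int) × List (Int × Int)) i =>
        (s.1 ++ [gA arr i], s.2 ++ [hA arr i])) (xs, ys)
      = (xs ++ L.map (gA arr), ys ++ L.map (hA arr)) := by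
  induction L with
  | nil => simp
  | cons i L ih => intro xs ys; simp [ih]

theorem core (arr : List (List Int)) (L : List Int) :
    ∀ accA accB : List (Int × Int),
    L.Pairwise (· ≠ ·) →
    accB.Pairwise (fun a b => lexlt b a = false) →
    (∀ i ∈ L, ∀ x ∈ accB, x.2 ≠ i) →
    L.foldl (fun s i => bStep s (i, PySem.List.pyGetD arr i []))
      ((first2 accA).1, (first2 accA).2, (last2 accB).1, (last2 accB).2)
    = ((first2 (L.foldl (fun acc i => PySem.List.insertBy lexlt (gA arr i) acc) accA)).1,
       (first2 (L.foldl (fun acc i => PySem.List.insertBy lexlt (gA arr i) acc) accA)).2,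
       (last2 (L.foldl (fun acc i => PySem.List.insertBy lexlt (hA arr i) acc) accB)).1,
       (last2 (L.foldl (fun acc i => PySem.List.insertBy lexlt (hA arr i) acc) accB)).2) := by
  induction L with
  | nil => intro accA accB _ _ _; rfl
  | cons i L ih =>
    intro accA accB hL hsB hfB
    have hstep :
        bStep ((first2 accA).1, (first2 accA).2, (last2 accB).1, (last2 accB).2)
          (i, PySem.List.pyGetD arr i [])
        = ((first2 (PySem.List.insertBy lexlt (gA arr i) accA)).1,
           (first2 (PySem.List.insertBy lexlt (gA arr i) accA)).2,
           (last2 (PySem.List.insertBy lexlt (hA arr i) accB)).1,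
           (last2 (PySem.List.insertBy lexlt (hA arr i) accB)).2) := by
      rw [first2_insertBy,
          last2_insertBy _ _ hsB (fun x hx => hfB i (List.mem_cons_self) x hx)]
      rfl
    simp only [List.foldl_cons]
    rw [hstep]
    exact ih _ _ (List.pairwise_cons.mp hL).2
      (insertBy_pairwise_lex _ _ hsB)
      (fun j hj x hx => by
        rcases (PySem.List.insertBy_mem_iff _ _ _ _).mp hx with rfl | hx'
        · exact (List.pairwise_cons.mp hL).1 j hj
        · exact hfB j (List.mem_cons_of_mem _ hj) x hx')

theorem foldl_insertBy_length (f : Int → Int × Int) (L : List Int) :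
    ∀ acc : List (Int × Int),
    (L.foldl (fun acc i => PySem.List.insertBy lexlt (f i) acc) acc).length
      = acc.length + L.length := by
  induction L with
  | nil => intro acc; simp
  | cons i L ih =>
    intro acc
    rw [List.foldl_cons, ih, insertBy_length]
    simp only [List.length_cons]
    omega

theorem pen_eq : ∀ (l : List (Int × Int)), 2 ≤ l.length → pen l = l[l.length - 2]?
  | [], h => by simp at h
  | [_], h => by simp at h
  | [u, v], _ => by simp [pen]
  | u :: v :: w :: t, _ => by
    have ih := pen_eq (v :: w :: t) (by simp)
    have hidx : (u :: v :: w :: t).length - 2 = ((v :: w :: t).length - 2) + 1 := by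
      simp only [List.length_cons]; omega
    show pen (v :: w :: t) = _
    rw [ih, hidx, List.getElem?_cons_succ]

-- ===== VERDICT =====
theorem maxDistance_spec : Claim_equal_maxDistance := by
  intro arr _ hpre
  obtain ⟨hlen, hrows⟩ := hpre
  unfold Spec_maxDistance
  have hLeq : PySem.List.pyRange 0 (PySem.List.len arr)
      = List.map (fun k : Nat => (k : Int)) (List.range arr.length) := by
    rw [PySem.List.len_eq]
    exact PySem.List.pyRange_zero_natCast _
  have hLlen : (PySem.List.pyRange 0 (PySem.List.len arr)).length = arr.length := by
    rw [hLeq, List.length_map, List.length_range]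
  have hLpw : (PySem.List.pyRange 0 (PySem.List.len arr)).Pairwise (· ≠ ·) := by
    rw [hLeq]
    exact List.Nodup.map (fun a b h => by exact_mod_cast h) List.nodup_range
  set L := PySem.List.pyRange 0 (PySem.List.len arr) with hL
  set SA := L.foldl (fun acc i => PySem.List.insertBy lexlt (gA arr i) acc) [] with hSA
  set SB := L.foldl (fun acc i => PySem.List.insertBy lexlt (hA arr i) acc) [] with hSB
  have hSAlen : SA.length = arr.length := by
    rw [hSA, foldl_insertBy_length]; simpa using hLlen
  have hSBlen : SB.length = arr.length := by
    rw [hSB, foldl_insertBy_length]; simpa using hLlen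
  -- A's value
  have habuild :
      L.foldl (fun (s : List (Int × Int) × List (Int × Int)) i =>
          (s.1 ++ [(PySem.List.pyGetD (PySem.List.pyGetD arr i []) 0 0, i)],
           s.2 ++ [(PySem.List.pyGetD (PySem.List.pyGetD arr i []) (-1) 0, i)]))
        ([], [])
      = (L.map (gA arr), L.map (hA arr)) := by
    simpa [gA, hA] using buildAB arr L [] []
  have hsorta : PySem.List.sorted2 (L.map (gA arr)) Prod.fst Prod.snd = SA := by
    simp only [PySem.List.sorted2, Bool.false_eq_true, if_false, List.foldl_map]
    rfl
  have hsortb : PySem.List.sorted2 (L.map (hA arr)) Prod.fst Prod.snd = SB := by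
    simp only [PySem.List.sorted2, Bool.false_eq_true, if_false, List.foldl_map]
    rfl
  have hAval : maxDistance arr =
      if (PySem.List.pyGetD SA 0 ((0:Int),(0:Int))).2
          = (PySem.List.pyGetD SB (-1) ((0:Int),(0:Int))).2 then
        max |(PySem.List.pyGetD SA 0 ((0:Int),(0:Int))).1
              - (PySem.List.pyGetD SB (-2) ((0:Int),(0:Int))).1|
            |(PySem.List.pyGetD SA 1 ((0:Int),(0:Int))).1
              - (PySem.List.pyGetD SB (-1) ((0:Int),(0:Int))).1|
      else
        |(PySem.List.pyGetD SA 0 ((0:Int),(0:Int))).1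
          - (PySem.List.pyGetD SB (-1) ((0:Int),(0:Int))).1| := by
    simp only [maxDistance, ← hL, habuild, hsorta, hsortb]
  -- B's value
  have hbfold : (PySem.List.enumerate arr).foldl bStep (none, none, none, none)
      = ((first2 SA).1, (first2 SA).2, (last2 SB).1, (last2 SB).2) := by
    rw [PySem.List.enumerate_eq_map_pyRange arr [], List.foldl_map, ← hL]
    exact core arr L [] [] hLpw (List.Pairwise.nil) (by intro i _ x hx; simp at hx)
  -- shapes
  rcases hsa : SA with _ | ⟨a0, _ | ⟨a1, ra⟩⟩
  · rw [hsa] at hSAlen; simp at hSAlen; omega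
  · rw [hsa] at hSAlen; simp at hSAlen; omega
  rcases hsb : SB with _ | ⟨b0, _ | ⟨b1, rb⟩⟩
  · rw [hsb] at hSBlen; simp at hSBlen; omega
  · rw [hsb] at hSBlen; simp at hSBlen; omega
  rw [hsa, hsb] at hAval
  rw [hsa, hsb] at hbfold
  rw [hsb] at hSBlen
  set T := b0 :: b1 :: rb with hT
  have hTlen : 2 ≤ T.length := by simp [hT]
  -- endpoint values
  have hlast : T.getLast? = some (T.getLast (by simp [hT])) :=
    List.getLast?_eq_some_getLast _
  have hlastElem : T.getLast (by simp [hT]) = T[T.length - 1]'(by omega) := by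
    rw [List.getLast_eq_getElem]
  have hpen : pen T = some (T[T.length - 2]'(by omega)) := by
    rw [pen_eq T hTlen, List.getElem?_eq_getElem]
  have hg1 : PySem.List.pyGetD T (-1) ((0:Int),(0:Int)) = T[T.length - 1]'(by omega) := by
    rw [PySem.List.pyGetD_neg_ofNat T 1 _ (by omega) (by omega)]
  have hg2 : PySem.List.pyGetD T (-2) ((0:Int),(0:Int)) = T[T.length - 2]'(by omega) := by
    rw [PySem.List.pyGetD_neg_ofNat T 2 _ (by omega) (by omega)]
  -- reduce both sides
  rw [hAval]
  simp only [maxDistance_alt, hbfold]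
  simp only [first2, last2, hlast, hlastElem, hpen]
  simp only [PySem.List.pyGetD_ofNat', List.getD]
  rw [hg1, hg2]
  simp
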